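-- pv_equiv track=rewrite | github.com/lehancode/uba_computacion | parciales/Python - ComB-20241126/solucion.py | cantidad_respuestas_correctas
-- ===== SOURCE A (Python) =====
-- def cantidad_respuestas_correctas(examen: list[bool]) -> int:
--   verdaderas: int = 0
--   falsas: int = 0
--
--   for respuesta in examen:
--     if respuesta == True:
--       if verdaderas < (len(examen) / 2):
--         verdaderas += 1
--     if respuesta == False:
--       if falsas < (len(examen) / 2):
--         falsas += 1
--
--   return verdaderas + falsas
-- ===== SOURCE B (Python) =====
-- def cantidad_respuestas_correctas(examen: list[bool]) -> int:
--     cap = (len(examen) + 1) // 2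
--     t = examen.count(True)
--     f = examen.count(False)
--     return min(t, cap) + min(f, cap)
-- ===== Notes on version B (the rewrite author's own statement) =====
-- stated objective: simpler
-- what changed: Replaces A's single interleaved pass with two capped running counters by counting all True and all False answers outright (list.count) and applying the cap min(count,(n+1)//2) in closed form.
import Mathlib
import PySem

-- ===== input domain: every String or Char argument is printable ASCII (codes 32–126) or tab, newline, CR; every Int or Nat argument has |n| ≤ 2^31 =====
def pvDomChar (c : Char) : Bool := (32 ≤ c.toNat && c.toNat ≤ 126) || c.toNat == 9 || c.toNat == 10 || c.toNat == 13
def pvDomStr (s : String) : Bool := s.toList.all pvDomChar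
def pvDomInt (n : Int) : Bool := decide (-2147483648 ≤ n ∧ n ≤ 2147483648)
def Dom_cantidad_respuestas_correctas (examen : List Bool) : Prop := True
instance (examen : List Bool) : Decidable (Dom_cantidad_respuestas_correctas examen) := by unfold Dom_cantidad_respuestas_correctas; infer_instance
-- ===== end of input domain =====

-- B replaces A's interleaved pass with two capped counters by full counts plus a closed-form cap (objective: simpler).

-- ===== PORT A =====
-- Loop body of A, as in the Python: two independent if-chains updating (verdaderas, falsas).
-- Python compares 'verdaderas < len(examen)/2' in float; for counters bounded by the list
-- length this is exact and equals the integer comparison 2*verdaderas < n.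
def pvStepA (n : Int) (vf : Int × Int) (respuesta : Bool) : Int × Int :=
  let vf := if respuesta == true then
      (if 2 * vf.1 < n then (vf.1 + 1, vf.2) else vf)
    else vf
  if respuesta == false then
      (if 2 * vf.2 < n then (vf.1, vf.2 + 1) else vf)
    else vf

def cantidad_respuestas_correctas (examen : List Bool) : Int :=
  let st := examen.foldl (pvStepA (examen.length : Int)) (0, 0)
  st.1 + st.2

-- ===== PORT B =====
def cantidad_respuestas_correctas_alt (examen : List Bool) : Int :=
  let cap : Int := PySem.Int.floordiv ((examen.length : Int) + 1) 2
  let t : Int := PySem.List.count examen true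
  let f : Int := PySem.List.count examen false
  min t cap + min f cap

-- ===== PRECONDITION & SPEC =====
def Spec_cantidad_respuestas_correctas (examen : List Bool) (out : Int) : Prop := out = cantidad_respuestas_correctas_alt examen
instance (examen : List Bool) (out : Int) : Decidable (Spec_cantidad_respuestas_correctas examen out) := by unfold Spec_cantidad_respuestas_correctas; infer_instance

-- ===== CLAIM (what is proved, stated in full; the proofs are below) =====
def Claim_equal_cantidad_respuestas_correctas : Prop := ∀ (examen : List Bool), Dom_cantidad_respuestas_correctas examen → Spec_cantidad_respuestas_correctas examen (cantidad_respuestas_correctas examen)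

-- ===== LEMMAS AND PROOFS =====

-- One step of A's loop, split by the answer's value.
theorem pvStepA_eq (n v f : Int) (x : Bool) :
    pvStepA n (v, f) x =
      (if x then (if 2 * v < n then v + 1 else v) else v,
       if x then f else (if 2 * f < n then f + 1 else f)) := by
  cases x <;> simp [pvStepA] <;> split <;> rfl

-- Loop invariant: with total length n fixed and cap = (n+1)//2 (so the float test
-- '2*v < n' is exactly 'v < cap'), a state (v, f) with 2*v, 2*f ≤ n + 1 folds to
-- componentwise min (start + full count) cap.
theorem pv_loop_eq (n : Int) (l : List Bool) (v f : Int)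
    (hv : 2 * v ≤ n + 1) (hf : 2 * f ≤ n + 1) :
    l.foldl (pvStepA n) (v, f) =
      (min (v + PySem.List.count l true) (PySem.Int.floordiv (n + 1) 2),
       min (f + PySem.List.count l false) (PySem.Int.floordiv (n + 1) 2)) := by
  have h2 : PySem.Int.floordiv (n + 1) 2 = (n + 1) / 2 :=
    PySem.Int.floordiv_eq_ediv_of_pos (by omega)
  induction l generalizing v f with
  | nil =>
    rw [List.foldl_nil, Prod.mk.injEq]
    constructor <;> simp [PySem.List.count_eq, h2] <;> omega
  | cons x xs ih =>
    rw [List.foldl_cons, pvStepA_eq]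
    cases x
    · by_cases h : 2 * f < n
      · rw [if_neg (by simp), if_neg (by simp), if_pos h, ih v (f + 1) hv (by omega), Prod.mk.injEq]
        constructor <;> simp [PySem.List.count_eq, List.count_cons, h2] <;> omega
      · rw [if_neg (by simp), if_neg (by simp), if_neg h, ih v f hv hf, Prod.mk.injEq]
        constructor <;> simp [PySem.List.count_eq, List.count_cons, h2] <;> omega
    · by_cases h : 2 * v < n
      · rw [if_pos rfl, if_pos rfl, if_pos h, ih (v + 1) f (by omega) hf, Prod.mk.injEq]
        constructor <;> simp [PySem.List.count_eq, List.count_cons, h2] <;> omega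
      · rw [if_pos rfl, if_pos rfl, if_neg h, ih v f hv hf, Prod.mk.injEq]
        constructor <;> simp [PySem.List.count_eq, List.count_cons, h2] <;> omega

-- ===== VERDICT (by name: the statement is the Claim_ definition above) =====
theorem cantidad_respuestas_correctas_spec : Claim_equal_cantidad_respuestas_correctas := by
  intro examen _
  unfold Spec_cantidad_respuestas_correctas cantidad_respuestas_correctas cantidad_respuestas_correctas_alt
  rw [pv_loop_eq (examen.length : Int) examen 0 0 (by omega) (by omega)]
  simp
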